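-- pv_equiv track=rewrite | github.com/jigglypop/- | 09/0919/[1790]수이어쓰기2 copy.py | count
-- ===== SOURCE A (Python) =====
-- def count(n):
--     ans = 0
--     start = 1
--     len = 1
--     while start <= n:
--         end = start * 10-1
--         if end > n:
--             end = n
--         ans += (end-start+1)*len
--         start *= 10
--         len += 1
--     return ans
-- ===== SOURCE B (Python) =====
-- def count(n):
--     # closed form: total digits of 1..n = d*(n+1) - (10**d - 1)//9, d = digit count of n
--     d = 0
--     t = n
--     while t > 0:
--         t //= 10
--         d += 1
--     return d * (n + 1) - (10 ** d - 1) // 9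
-- ===== Notes on version B (the rewrite author's own statement) =====
-- stated objective: alternative
-- what changed: replaces A's per-band accumulation loop (summing (end-start+1)*len for each power-of-ten band) by the closed formula d*(n+1) - (10^d-1)//9 after a tiny digit-count loop
import Mathlib
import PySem

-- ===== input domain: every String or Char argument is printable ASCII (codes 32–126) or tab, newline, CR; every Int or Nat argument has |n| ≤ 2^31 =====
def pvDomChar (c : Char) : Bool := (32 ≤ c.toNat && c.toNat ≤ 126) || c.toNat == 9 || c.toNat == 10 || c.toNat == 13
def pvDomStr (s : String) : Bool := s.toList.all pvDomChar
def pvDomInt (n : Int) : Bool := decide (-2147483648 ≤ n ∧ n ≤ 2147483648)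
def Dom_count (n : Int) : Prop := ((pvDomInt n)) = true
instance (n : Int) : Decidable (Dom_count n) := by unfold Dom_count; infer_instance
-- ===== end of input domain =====

-- B replaces A's per-band accumulation loop by the closed formula d*(n+1) - (10^d-1)//9
-- (d = digit count of n); alternative algorithm, similar cost.

-- ===== PORT A =====
-- A's while loop; the extra `0 < start` guard only ensures termination in Lean and is
-- always true on the actual call chain (start begins at 1 and is multiplied by 10).
def countLoop (n ans start len : Int) : Int :=
  if h : start ≤ n ∧ 0 < start then
    countLoop n (ans + ((if start * 10 - 1 > n then n else start * 10 - 1) - start + 1) * len)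
      (start * 10) (len + 1)
  else ans
termination_by (n + 1 - start).toNat
decreasing_by
  have h1 := h.1; have h2 := h.2
  have h3 : start + 9 * 1 ≤ start + 9 * start := by
    have : (1:Int) ≤ start := h2
    nlinarith
  have h4 : start * 10 = start + 9 * start := by ring
  omega

def count (n : Int) : Int := countLoop n 0 1 1

-- ===== PORT B =====
-- B's digit-count loop: while t > 0: t //= 10; d += 1
def digitsLoop (t d : Int) : Int :=
  if h : 0 < t then digitsLoop (PySem.Int.floordiv t 10) (d + 1) else d
termination_by t.toNat
decreasing_by
  rw [PySem.Int.floordiv_eq_ediv_of_pos (by norm_num)]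
  omega

-- 10 ** d is ported as 10 ^ d.toNat (d is always ≥ 0: the accumulator starts at 0)
def count_alt (n : Int) : Int :=
  let d := digitsLoop n 0
  d * (n + 1) - PySem.Int.floordiv (10 ^ d.toNat - 1) 9

-- ===== PRECONDITION & SPEC =====
def Spec_count (n : Int) (out : Int) : Prop := out = count_alt n
instance (n : Int) (out : Int) : Decidable (Spec_count n out) := by unfold Spec_count; infer_instance

-- ===== CLAIM (what is proved, stated in full; the proofs are below) =====
def Claim_equal_count : Prop := ∀ (n : Int), Dom_count n → Spec_count n (count n)

-- ===== LEMMAS AND PROOFS =====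

-- rep k = (10^k - 1)/9 = 1 + 10 + … + 10^(k-1)
def rep : Nat → Int
  | 0 => 0
  | k + 1 => 10 ^ k + rep k

theorem rep_nine : ∀ k : Nat, 9 * rep k = 10 ^ k - 1 := by
  intro k
  induction k with
  | zero => simp [rep]
  | succ k ih => rw [rep]; rw [pow_succ]; linarith

theorem floordiv_rep (k : Nat) : PySem.Int.floordiv (10 ^ k - 1) 9 = rep k := by
  rw [← rep_nine k, PySem.Int.floordiv_eq_ediv_of_pos (by norm_num)]
  exact Int.mul_ediv_cancel_left _ (by norm_num)

theorem digitsLoop_nonpos (t d : Int) (h : ¬ 0 < t) : digitsLoop t d = d := by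
  rw [digitsLoop]; simp [h]

theorem digitsLoop_eq : ∀ (k : Nat) (t d : Int),
    10 ^ k ≤ t → t < 10 ^ (k + 1) → digitsLoop t d = d + (k + 1) := by
  intro k
  induction k with
  | zero =>
    intro t d h1 h2
    simp only [pow_zero] at h1 h2
    rw [digitsLoop]
    have hpos : 0 < t := by omega
    rw [dif_pos hpos, PySem.Int.floordiv_eq_ediv_of_pos (by norm_num)]
    have : t / 10 = 0 := by omega
    rw [this, digitsLoop_nonpos 0 (d + 1) (by norm_num)]
    push_cast; ring
  | succ k ih =>
    intro t d h1 h2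
    have hp : (0:Int) < 10 ^ k := by positivity
    have e1 : (10:Int) ^ (k + 1) = 10 * 10 ^ k := by ring
    have e2 : (10:Int) ^ (k + 2) = 100 * 10 ^ k := by ring
    have hpos : 0 < t := by rw [e1] at h1; nlinarith
    rw [digitsLoop, dif_pos hpos, PySem.Int.floordiv_eq_ediv_of_pos (by norm_num)]
    have hb1 : 10 ^ k ≤ t / 10 := by rw [e1] at h1; omega
    have hb2 : t / 10 < 10 ^ (k + 1) := by rw [e1]; rw [e2] at h2; omega
    rw [ih (t / 10) (d + 1) hb1 hb2]
    push_cast; ring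

theorem countLoop_stop (n ans start len : Int) (h : ¬ (start ≤ n ∧ 0 < start)) :
    countLoop n ans start len = ans := by
  rw [countLoop]; simp [h]

theorem countLoop_eq : ∀ (m k : Nat) (n ans : Int),
    10 ^ (k + m) ≤ n → n < 10 ^ (k + m + 1) →
    countLoop n ans (10 ^ k) ((k : Int) + 1) =
      ans + ((k : Int) + m + 1) * (n + 1) - rep (k + m + 1) - ((k : Int) * 10 ^ k - rep k) := by
  intro m
  induction m with
  | zero =>
    intro k n ans h1 h2
    simp only [Nat.add_zero] at h1 h2
    have hp : (0:Int) < 10 ^ k := by positivity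
    have e1 : (10:Int) ^ (k + 1) = 10 ^ k * 10 := by ring
    rw [countLoop, dif_pos ⟨h1, hp⟩]
    have hend : (if 10 ^ k * 10 - 1 > n then n else (10:Int) ^ k * 10 - 1) = n := by
      rw [e1] at h2; split <;> omega
    rw [hend]
    rw [countLoop_stop _ _ _ _ (by rw [e1] at h2; intro hc; omega)]
    rw [rep]; push_cast; ring
  | succ m ih =>
    intro k n ans h1 h2
    have hp : (0:Int) < 10 ^ k := by positivity
    have hmono : (10:Int) ^ (k + 1) ≤ 10 ^ (k + (m + 1)) := by
      apply pow_le_pow_right₀ (by norm_num); omega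
    have e1 : (10:Int) ^ (k + 1) = 10 ^ k * 10 := by ring
    have hg : 10 ^ k ≤ n := by nlinarith [h1, hmono]
    rw [countLoop, dif_pos ⟨hg, hp⟩]
    have hend : (if 10 ^ k * 10 - 1 > n then n else (10:Int) ^ k * 10 - 1)
        = 10 ^ k * 10 - 1 := by
      have : (10:Int) ^ (k + 1) ≤ n := le_trans hmono h1
      rw [e1] at this; split <;> omega
    rw [hend]
    have h1' : (10:Int) ^ ((k + 1) + m) ≤ n := by
      have : (k + 1) + m = k + (m + 1) := by omega
      rw [this]; exact h1
    have h2' : n < (10:Int) ^ ((k + 1) + m + 1) := by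
      have : (k + 1) + m + 1 = k + (m + 1) + 1 := by omega
      rw [this]; exact h2
    have hcall : (10:Int) ^ k * 10 = 10 ^ (k + 1) := by ring
    have hlen : ((k : Int) + 1) + 1 = ((k + 1 : Nat) : Int) + 1 := by push_cast; ring
    rw [hcall, hlen, ih (k + 1) n _ h1' h2']
    have hrep : rep ((k + 1) + m + 1) = rep (k + (m + 1) + 1) := by
      congr 1; omega
    rw [hrep, show rep (k + 1) = 10 ^ k + rep k from by rw [rep]]
    push_cast; ring

-- ===== VERDICT (by name: the statement is the Claim_ definition above) =====
theorem count_spec : Claim_equal_count := by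
  intro n _
  unfold Spec_count
  have hB : count_alt n = (digitsLoop n 0) * (n + 1)
      - PySem.Int.floordiv (10 ^ (digitsLoop n 0).toNat - 1) 9 := rfl
  have hdiv9 : PySem.Int.floordiv ((1:Int) - 1) 9 = 0 := by
    rw [PySem.Int.floordiv_eq_ediv_of_pos (by norm_num)]; simp
  by_cases hn : 0 < n
  · -- n ≥ 1: take k = number of digits minus 1
    set k := Nat.log 10 n.toNat with hk
    have hnt : n.toNat ≠ 0 := by omega
    have hl : (10:Int) ^ k ≤ n := by
      have h := Nat.pow_log_le_self 10 hnt
      have h' : ((10 ^ k : Nat) : Int) ≤ (n.toNat : Int) := by exact_mod_cast h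
      push_cast at h'; omega
    have hr : n < (10:Int) ^ (k + 1) := by
      have h := Nat.lt_pow_succ_log_self (by norm_num : 1 < 10) n.toNat
      have h' : ((n.toNat : Int)) < ((10 ^ (k + 1) : Nat) : Int) := by exact_mod_cast h
      push_cast at h'; omega
    have hd : digitsLoop n 0 = (k : Int) + 1 := by
      rw [digitsLoop_eq k n 0 hl hr]; ring
    have hdt : (digitsLoop n 0).toNat = k + 1 := by rw [hd]; omega
    have hA : count n = ((k : Int) + 1) * (n + 1) - rep (k + 1) := by
      unfold count
      have h0 := countLoop_eq k 0 n 0 (by simpa using hl) (by simpa using hr)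
      simp only [pow_zero, Nat.cast_zero, zero_add] at h0
      rw [h0, show rep 0 = (0:Int) from rfl]; ring
    rw [hA, hB, hdt, hd, floordiv_rep]
  · -- n ≤ 0: both sides are 0
    have hA : count n = 0 := by
      unfold count; exact countLoop_stop n 0 1 1 (by omega)
    rw [hA, hB, digitsLoop_nonpos n 0 hn]
    simp only [Int.toNat_zero, pow_zero, hdiv9]
    ring
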